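-- pv_equiv track=rewrite | github.com/FennOmix/pGlycoTools | glycoworkbench_to_gdb.py | _gwb_items_to_canon
-- ===== SOURCE A (Python) =====
-- def _gwb_items_to_canon(items):
--     root_items = []
--     branches = []
--     branch_count = 0
--     for i in range(len(items)):
--         if items[i] == "(":
--             break
--         root_items.append(items[i])
--
--     for i in range(i, len(items)):
--         if items[i] != "(":
--             break
--         branch_count += 1
--
--     start = i
--     left_parent_count = branch_count
--     for i in range(start, len(items)):
--         if items[i] == ")":
--             if left_parent_count == branch_count:
--                 branches.append(items[start:i])
--                 start = i + 1
--                 branch_count -= 1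
--                 if branch_count == 0:
--                     branches.append(items[i + 1 :])
--                     break
--             left_parent_count -= 1
--         elif items[i] == "(":
--             left_parent_count += 1
--
--     merged_codes = []
--     full_root = "(" + "(".join(root_items)
--     full_right_ = ")" * len(root_items)
--     for branch in branches:
--         merged_codes.append(_gwb_items_to_canon(branch))
--     merged_codes.sort(key=lambda x: (len(x), x))
--     canon = full_root + "".join(merged_codes) + full_right_
--     return canon
-- ===== SOURCE B (Python) =====
-- def _gwb_items_to_canon(items):
--     # stack of frames: [roots, seps_remaining, child_codes, counting_open_run]
--     stack = [[[], 0, [], False]]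
--     for t in items:
--         top = stack[-1]
--         if t == "(":
--             top[1] += 1
--             top[3] = True
--         elif top[3]:
--             top[3] = False
--             stack.append([[], 0, [], False])
--             _feed(stack, t)
--         else:
--             _feed(stack, t)
--     code = _finalize(stack.pop())
--     while stack:
--         top = stack.pop()
--         top[2].append(code)
--         code = _finalize(top)
--     return code
--
-- def _feed(stack, t):
--     if t != ")":
--         stack[-1][0].append(t)
--         return
--     code = _finalize(stack.pop())
--     while stack and stack[-1][1] == 0:
--         top = stack.pop()
--         top[2].append(code)
--         code = _finalize(top)
--     if stack:
--         top = stack[-1]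
--         top[2].append(code)
--         top[1] -= 1
--         stack.append([[], 0, [], False])
--     else:
--         stack.append([[], 0, [code], False])
--
-- def _finalize(frame):
--     roots, _, codes, _ = frame
--     codes.sort(key=lambda x: (len(x), x))
--     return "(" + "(".join(roots) + "".join(codes) + ")" * len(roots)
-- ===== Notes on version B (the rewrite author's own statement) =====
-- stated objective: alternative
-- what changed: B replaces A's recursion over index-computed list slices (three index loops per level, re-slicing the token list for every branch) by a single non-recursive left-to-right pass over the tokens with an explicit stack of frames (roots, pending separators, child codes), canonicalizing each node bottom-up as its frame is closed.
-- outside the precondition, e.g. on _gwb_items_to_canon(['a', '(', 'b']): A returns '(a)', B returns '(a(b))'; on _gwb_items_to_canon([')', 'a']): A returns '()(a))', B returns '(a()'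
import Mathlib
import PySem

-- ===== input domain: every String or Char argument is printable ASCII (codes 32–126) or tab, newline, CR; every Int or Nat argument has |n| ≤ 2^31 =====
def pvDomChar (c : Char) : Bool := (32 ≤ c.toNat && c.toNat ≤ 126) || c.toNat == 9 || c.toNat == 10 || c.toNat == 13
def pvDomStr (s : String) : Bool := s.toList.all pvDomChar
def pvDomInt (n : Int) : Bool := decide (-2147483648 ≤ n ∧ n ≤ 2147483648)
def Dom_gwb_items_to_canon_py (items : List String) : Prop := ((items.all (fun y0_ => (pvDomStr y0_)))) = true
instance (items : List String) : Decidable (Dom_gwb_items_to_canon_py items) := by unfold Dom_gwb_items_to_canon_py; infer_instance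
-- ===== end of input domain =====

-- B re-implements A's recursive slice-based canonicalizer as one non-recursive left-to-right
-- pass with an explicit stack of frames; equivalence is proved on well-formed serializations.

-- ")" * k
def pyRParens (k : Nat) : String := String.ofList (List.replicate k ')')

-- ===== PORT A =====
-- first loop: collect root_items until the first "("; returns (root_items, final value of i).
-- (Python leaves i at len-1 when the loop runs out; on [] Python raises — guarded in the main def.)
def aLoop1 : List String → List String × Nat
  | [] => ([], 0)                                   -- unreachable (main def guards items ≠ [])
  | [x] => if x = "(" then ([], 0) else ([x], 0)
  | x :: y :: xs =>
    if x = "(" then ([], 0)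
    else
      let r := aLoop1 (y :: xs)
      (x :: r.1, r.2 + 1)

-- second loop from index i: count the run of "("; returns (branch_count, i₂ - i).
def aLoop2 : List String → Nat × Nat
  | [] => (0, 0)
  | [x] => if x = "(" then (1, 0) else (0, 0)       -- loop runs out: i stays at the last index
  | x :: y :: xs =>
    if x = "(" then
      let r := aLoop2 (y :: xs)
      (r.1 + 1, r.2 + 1)
    else (0, 0)

-- third loop from index start: split off branches at ")" tokens seen when
-- left_parent_count == branch_count; acc holds items[start:i] reversed.
def aLoop3 : List String → Int → Int → List String → List (List String)
  | [], _, _, _ => []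
  | x :: xs, bc, left, acc =>
    if x = ")" then
      if left = bc then
        if bc - 1 = 0 then [acc.reverse, xs]        -- append items[start:i], then items[i+1:], break
        else acc.reverse :: aLoop3 xs (bc - 1) (left - 1) []
      else aLoop3 xs bc (left - 1) (x :: acc)
    else if x = "(" then aLoop3 xs bc (left + 1) (x :: acc)
    else aLoop3 xs bc left (x :: acc)

theorem aLoop3_mem_length : ∀ (seg : List String) (bc left : Int) (acc b : List String),
    b ∈ aLoop3 seg bc left acc → b.length < acc.length + seg.length := by
  intro seg
  induction seg with
  | nil => intro bc left acc b hb; simp [aLoop3] at hb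
  | cons x xs ih =>
    intro bc left acc b hb
    simp only [aLoop3] at hb
    split_ifs at hb with h1 h2 h3 h4
    · simp only [List.mem_cons, List.not_mem_nil, or_false] at hb
      rcases hb with rfl | rfl
      all_goals simp
      omega
    · rcases List.mem_cons.mp hb with hb | hb
      · subst hb; simp
      · have := ih (bc - 1) (left - 1) [] b hb; simp at this ⊢; omega
    · have := ih bc (left - 1) (x :: acc) b hb; simp at this ⊢; omega
    · have := ih bc (left + 1) (x :: acc) b hb; simp at this ⊢; omega
    · have := ih bc left (x :: acc) b hb; simp at this ⊢; omega

def gwb_items_to_canon_py (items : List String) : String :=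
  if items.isEmpty then ""                          -- Python raises UnboundLocalError here (outside Pre_)
  else
    let p1 := aLoop1 items
    let p2 := aLoop2 (items.drop p1.2)
    let start := p1.2 + p2.2
    let branches := aLoop3 (items.drop start) (p2.1 : Int) (p2.1 : Int) []
    let merged := branches.attach.map (fun b => gwb_items_to_canon_py b.1)
    let sortedCodes := PySem.List.sorted2 merged PySem.Str.len (fun x => x)
    ("(" ++ PySem.Str.join "(" p1.1) ++ PySem.Str.join "" sortedCodes ++ pyRParens p1.1.length
termination_by items.length
decreasing_by
  have h := aLoop3_mem_length (items.drop start) (p2.1 : Int) (p2.1 : Int) [] b.1 b.2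
  have hd : (items.drop start).length ≤ items.length := by simp
  simp only [List.length_nil, Nat.zero_add] at h
  omega

-- ===== PORT B =====
-- a frame of B's stack: root tokens so far, ")"-separators still owed, finished child codes,
-- and whether we are inside the frame's run of "(" tokens
structure BFrame where
  roots : List String
  seps : Nat
  codes : List String
  counting : Bool
deriving DecidableEq, Repr

def bFresh : BFrame := ⟨[], 0, [], false⟩

-- _finalize: canonical string of a completed frame
def bFinalize (f : BFrame) : String :=
  ("(" ++ PySem.Str.join "(" f.roots) ++
    PySem.Str.join "" (PySem.List.sorted2 f.codes PySem.Str.len (fun x => x)) ++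
    pyRParens f.roots.length

-- the while-loop of _feed's ")" path: pop completed frames, then consume one separator
def bClose (code : String) : List BFrame → List BFrame
  | [] => [⟨[], 0, [code], false⟩]
  | f :: rest =>
    if f.seps = 0 then bClose (bFinalize { f with codes := f.codes ++ [code] }) rest
    else bFresh :: { f with codes := f.codes ++ [code], seps := f.seps - 1 } :: rest

-- _feed
def bFeed (st : List BFrame) (t : String) : List BFrame :=
  if t ≠ ")" then
    match st with
    | [] => []                                      -- unreachable: the stack is never empty
    | f :: rest => { f with roots := f.roots ++ [t] } :: rest
  else
    match st with
    | [] => []                                      -- unreachable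
    | f :: rest => bClose (bFinalize f) rest

-- body of the main for-loop
def bStep (st : List BFrame) (t : String) : List BFrame :=
  match st with
  | [] => []                                        -- unreachable
  | f :: rest =>
    if t = "(" then { f with seps := f.seps + 1, counting := true } :: rest
    else if f.counting then bFeed (bFresh :: { f with counting := false } :: rest) t
    else bFeed (f :: rest) t

-- the final while-loop: absorb code upward and finalize every remaining frame
def bFinish : List BFrame → String → String
  | [], code => code
  | f :: rest, code => bFinish rest (bFinalize { f with codes := f.codes ++ [code] })

def gwb_items_to_canon_py_alt (items : List String) : String :=
  match items.foldl bStep [bFresh] with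
  | [] => ""                                        -- unreachable: the stack is never empty
  | f :: rest => bFinish rest (bFinalize f)

-- ===== PRECONDITION & SPEC =====
-- Pre_ is the grammar of well-formed GlycoWorkbench node serializations: a paren-free root
-- prefix, a run of n ≥ 1 "(" tokens, n branches each closed by a ")" at its own depth, and a
-- trailing branch, all recursively well formed (or a nonempty paren-free token list).
-- Pre_ excludes malformed token lists, on which A's branch slicing is an accident of its
-- index bookkeeping (and on which A raises UnboundLocalError whenever an empty sub-branch
-- is reached, e.g. on [] or ['a', ')']).

-- split a branch at its closing top-level ")" (d = current nesting depth)
def wfSplit : Nat → List String → Option (List String × List String)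
  | _, [] => none
  | d, x :: xs =>
    if x = ")" then
      if d = 0 then some ([], xs)
      else (wfSplit (d - 1) xs).map (fun p => (x :: p.1, p.2))
    else if x = "(" then (wfSplit (d + 1) xs).map (fun p => (x :: p.1, p.2))
    else (wfSplit d xs).map (fun p => (x :: p.1, p.2))

-- split n branches, then the trailing branch
def splitBranches : Nat → List String → Option (List (List String))
  | 0, body => some [body]
  | n + 1, body => (wfSplit 0 body).bind (fun p => (splitBranches n p.2).map (p.1 :: ·))

-- (roots, branches) of a well-shaped serialization
def parseNode (items : List String) : Option (List String × List (List String)) :=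
  if ")" ∈ items.takeWhile (fun t => t ≠ "(") then none
  else if (items.dropWhile (fun t => t ≠ "(")).isEmpty then
    (if items.isEmpty then none else some (items.takeWhile (fun t => t ≠ "("), []))
  else
    (splitBranches ((items.dropWhile (fun t => t ≠ "(")).takeWhile (fun t => t = "(")).length
        ((items.dropWhile (fun t => t ≠ "(")).dropWhile (fun t => t = "("))).map
      (fun bs => (items.takeWhile (fun t => t ≠ "("), bs))

-- well-formedness, bounded by d, the number of nesting levels still allowed: a serialization
-- of length L parses within L + 1 levels, so wfNode tests the grammar exactly
def wfNodeB : Nat → List String → Bool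
  | 0, _ => false
  | d + 1, items =>
    match parseNode items with
    | none => false
    | some (_, bs) => bs.all (wfNodeB d)

def wfNode (items : List String) : Bool := wfNodeB (items.length + 1) items

def Pre_gwb_items_to_canon_py (items : List String) : Prop := wfNode items = true
instance (items : List String) : Decidable (Pre_gwb_items_to_canon_py items) := by
  unfold Pre_gwb_items_to_canon_py; infer_instance

def pvWitness_gwb_items_to_canon_py : List String :=
  ["HexNAc", "(", "(", "Fuc", ")", "Hex", ")", "HexNAc"]

def Spec_gwb_items_to_canon_py (items : List String) (out : String) : Prop :=
  out = gwb_items_to_canon_py_alt items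
instance (items : List String) (out : String) : Decidable (Spec_gwb_items_to_canon_py items out) := by
  unfold Spec_gwb_items_to_canon_py; infer_instance

-- ===== CLAIM (what is proved, stated in full; the proofs are below) =====
def Claim_equal_gwb_items_to_canon_py : Prop := ∀ (items : List String),
  Dom_gwb_items_to_canon_py items → Pre_gwb_items_to_canon_py items →
    Spec_gwb_items_to_canon_py items (gwb_items_to_canon_py items)

-- ===== LEMMAS AND PROOFS =====

theorem wfSplit_shape : ∀ (d : Nat) (body b r : List String),
    wfSplit d body = some (b, r) → body = b ++ ")" :: r := by
  intro d body
  induction body generalizing d with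
  | nil => intro b r h; simp [wfSplit] at h
  | cons x xs ih =>
    intro b r h
    simp only [wfSplit] at h
    split_ifs at h with h1 h2 h3
    · simp at h; subst h1; rcases h with ⟨hb, hr⟩; subst hb; subst hr; rfl
    · rcases Option.map_eq_some_iff.mp h with ⟨⟨b', r'⟩, hp, he⟩
      simp at he; rcases he with ⟨hb, hr⟩
      subst hb; subst hr; subst h1
      simpa using congrArg (List.cons ")") (ih _ _ _ hp)
    · rcases Option.map_eq_some_iff.mp h with ⟨⟨b', r'⟩, hp, he⟩
      simp at he; rcases he with ⟨hb, hr⟩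
      subst hb; subst hr; subst h3
      simpa using congrArg (List.cons "(") (ih _ _ _ hp)
    · rcases Option.map_eq_some_iff.mp h with ⟨⟨b', r'⟩, hp, he⟩
      simp at he; rcases he with ⟨hb, hr⟩
      subst hb; subst hr
      simpa using congrArg (List.cons x) (ih _ _ _ hp)

theorem splitBranches_mem_length : ∀ (n : Nat) (body : List String) (bs : List (List String))
    (b : List String), splitBranches n body = some bs → b ∈ bs → b.length ≤ body.length := by
  intro n
  induction n with
  | zero => intro body bs b h hb; simp [splitBranches] at h; subst h; simp at hb; subst hb; rfl
  | succ n ih =>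
    intro body bs b h hb
    simp only [splitBranches] at h
    rcases Option.bind_eq_some_iff.mp h with ⟨⟨b1, r⟩, h1, h2⟩
    rcases Option.map_eq_some_iff.mp h2 with ⟨bs', h3, h4⟩
    subst h4
    have hshape := wfSplit_shape 0 body b1 r h1
    rcases List.mem_cons.mp hb with hb | hb
    · subst hb; subst hshape; simp
    · have := ih r bs' b h3 hb
      subst hshape; simp; omega

theorem dropWhile_ne_paren_head : ∀ (l : List String) (y : String) (ys : List String),
    l.dropWhile (fun t => t ≠ "(") = y :: ys → y = "(" := by
  intro l
  induction l with
  | nil => intro y ys h; simp at h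
  | cons a as ih =>
    intro y ys h
    rw [List.dropWhile_cons] at h
    split_ifs at h with hp
    · exact ih _ _ h
    · simp at hp
      cases h; exact hp

theorem parseNode_branch_length (items : List String) (roots : List String)
    (bs : List (List String)) (b : List String)
    (h : parseNode items = some (roots, bs)) (hb : b ∈ bs) : b.length < items.length := by
  unfold parseNode at h
  split_ifs at h with h1 h2 h3
  · simp only [Option.some.injEq, Prod.mk.injEq] at h
    rcases h with ⟨_, hbs⟩; subst hbs; simp at hb
  · rcases Option.map_eq_some_iff.mp h with ⟨bs', hsb, he⟩
    simp only [Prod.mk.injEq] at he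
    rcases he with ⟨_, hbs⟩; subst hbs
    have hlen := splitBranches_mem_length _ _ _ _ hsb hb
    have hsplit : items = items.takeWhile (fun t => t ≠ "(") ++ items.dropWhile (fun t => t ≠ "(") :=
      (List.takeWhile_append_dropWhile).symm
    have hrest2 : (items.dropWhile (fun t => t ≠ "(")) =
        (items.dropWhile (fun t => t ≠ "(")).takeWhile (fun t => t = "(") ++
        (items.dropWhile (fun t => t ≠ "(")).dropWhile (fun t => t = "(") :=
      (List.takeWhile_append_dropWhile).symm
    have hhead : ((items.dropWhile (fun t => t ≠ "(")).takeWhile (fun t => t = "(")).length ≥ 1 := by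
      rcases hx : items.dropWhile (fun t => t ≠ "(") with _ | ⟨y, ys⟩
      · rw [hx] at h2; simp at h2
      · have hy : y = "(" := dropWhile_ne_paren_head items y ys hx
        subst hy
        simp
    have e1 := congrArg List.length hsplit
    have e2 := congrArg List.length hrest2
    rw [List.length_append] at e1
    rw [List.length_append] at e2
    omega


-- the canonical string a node contributes, given its roots and its children's codes
def mkCanonStr (roots codes : List String) : String :=
  ("(" ++ PySem.Str.join "(" roots) ++
    PySem.Str.join "" (PySem.List.sorted2 codes PySem.Str.len (fun x => x)) ++
    pyRParens roots.length

-- nesting depth contributed by one token / a token list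
def depthTok (t : String) : Int := if t = "(" then 1 else if t = ")" then -1 else 0
def depth (l : List String) : Int := (l.map depthTok).sum

-- ---- facts about the grammar (Pre_) ----

theorem all_congr_mem {α : Type} (bs : List α) (f g : α → Bool)
    (h : ∀ b ∈ bs, f b = g b) : bs.all f = bs.all g := by
  induction bs with
  | nil => rfl
  | cons x xs ih =>
    simp only [List.all_cons, h x (by simp), ih (fun b hb => h b (by simp [hb]))]

theorem wfNodeB_congr : ∀ (d : Nat), ∀ (d' : Nat) (items : List String), items.length < d →
    items.length < d' → wfNodeB d items = wfNodeB d' items := by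
  intro d
  induction d with
  | zero => intro d' items h; omega
  | succ d ih =>
    intro d' items _ hd'
    rcases d' with _ | d'
    · omega
    · simp only [wfNodeB]
      rcases hp : parseNode items with _ | ⟨roots, bs⟩
      · rfl
      · apply all_congr_mem
        intro b hb
        have hlt := parseNode_branch_length items roots bs b hp hb
        exact ih d' b (by omega) (by omega)

theorem wfNode_iff (items : List String) : wfNode items = true ↔
    ∃ roots bs, parseNode items = some (roots, bs) ∧ ∀ b ∈ bs, wfNode b = true := by
  unfold wfNode
  constructor
  · intro hw
    simp only [wfNodeB] at hw
    rcases hp : parseNode items with _ | ⟨roots, bs⟩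
    · rw [hp] at hw; simp at hw
    · rw [hp] at hw
      refine ⟨roots, bs, rfl, ?_⟩
      intro b hb
      have := List.all_eq_true.mp hw b hb
      rw [wfNodeB_congr items.length (b.length + 1) b
        (by have := parseNode_branch_length items roots bs b hp hb; omega) (by omega)] at this
      exact this
  · rintro ⟨roots, bs, hp, hall⟩
    simp only [wfNodeB, hp]
    apply List.all_eq_true.mpr
    intro b hb
    have := hall b hb
    rw [wfNodeB_congr (b.length + 1) items.length b (by omega)
      (by have := parseNode_branch_length items roots bs b hp hb; omega)] at this
    exact this

theorem dropWhile_paren_head_ne : ∀ (l : List String) (y : String) (ys : List String),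
    l.dropWhile (fun t => t = "(") = y :: ys → y ≠ "(" := by
  intro l
  induction l with
  | nil => intro y ys h; simp at h
  | cons a as ih =>
    intro y ys h
    rw [List.dropWhile_cons] at h
    split_ifs at h with hp
    · exact ih _ _ h
    · simp at hp
      cases h; exact hp

theorem depth_nil : depth [] = 0 := rfl
theorem depth_cons (x : String) (l : List String) : depth (x :: l) = depthTok x + depth l := by
  simp [depth]
theorem depthTok_open : depthTok "(" = 1 := by decide
theorem depthTok_close : depthTok ")" = -1 := by decide
theorem depthTok_other (x : String) (h1 : x ≠ "(") (h2 : x ≠ ")") : depthTok x = 0 := by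
  simp [depthTok, h1, h2]

theorem wfSplit_safe : ∀ (d : Nat) (body b r : List String), wfSplit d body = some (b, r) →
    (∀ p x, (p ++ [x]) <+: b → x = ")" → 0 < (d : Int) + depth p) ∧ (d : Int) + depth b = 0 := by
  intro d body
  induction body generalizing d with
  | nil => intro b r h; simp [wfSplit] at h
  | cons x xs ih =>
    intro b r h
    simp only [wfSplit] at h
    split_ifs at h with h1 h2 h3
    · simp only [Option.some.injEq, Prod.mk.injEq] at h
      rcases h with ⟨hb, _⟩
      subst hb
      constructor
      · intro p y hpre _
        have := hpre.length_le
        simp at this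
      · subst h2; simp [depth_nil]
    · rcases Option.map_eq_some_iff.mp h with ⟨⟨b', r'⟩, hp, he⟩
      simp only [Prod.mk.injEq] at he
      rcases he with ⟨hb, hr⟩
      subst hb; subst hr
      obtain ⟨hsafe, hbal⟩ := ih (d - 1) b' r' hp
      have hd1 : 1 ≤ d := Nat.one_le_iff_ne_zero.mpr h2
      subst h1
      constructor
      · intro p y hpre hy
        cases p with
        | nil => rw [depth_nil]; omega
        | cons z p' =>
          rw [List.cons_append, List.cons_prefix_cons] at hpre
          obtain ⟨hz, hpre'⟩ := hpre
          have := hsafe p' y hpre' hy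
          subst hz
          rw [depth_cons, depthTok_close]
          omega
      · rw [depth_cons, depthTok_close]
        omega
    · rcases Option.map_eq_some_iff.mp h with ⟨⟨b', r'⟩, hp, he⟩
      simp only [Prod.mk.injEq] at he
      rcases he with ⟨hb, hr⟩
      subst hb; subst hr
      obtain ⟨hsafe, hbal⟩ := ih (d + 1) b' r' hp
      subst h3
      constructor
      · intro p y hpre hy
        cases p with
        | nil =>
          simp only [List.nil_append] at hpre
          have hx := (List.cons_prefix_cons.mp hpre).1
          rw [hy] at hx
          exact absurd hx (by decide)
        | cons z p' =>
          rw [List.cons_append, List.cons_prefix_cons] at hpre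
          obtain ⟨hz, hpre'⟩ := hpre
          have := hsafe p' y hpre' hy
          subst hz
          rw [depth_cons, depthTok_open]
          omega
      · rw [depth_cons, depthTok_open]
        omega
    · rcases Option.map_eq_some_iff.mp h with ⟨⟨b', r'⟩, hp, he⟩
      simp only [Prod.mk.injEq] at he
      rcases he with ⟨hb, hr⟩
      subst hb; subst hr
      obtain ⟨hsafe, hbal⟩ := ih d b' r' hp
      constructor
      · intro p y hpre hy
        cases p with
        | nil =>
          simp only [List.nil_append] at hpre
          have hx := (List.cons_prefix_cons.mp hpre).1
          rw [hy] at hx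
          exact absurd hx.symm h1
        | cons z p' =>
          rw [List.cons_append, List.cons_prefix_cons] at hpre
          obtain ⟨hz, hpre'⟩ := hpre
          have := hsafe p' y hpre' hy
          subst hz
          rw [depth_cons, depthTok_other _ h3 h1]
          omega
      · rw [depth_cons, depthTok_other _ h3 h1]
        omega

-- decomposition of a parsed node: items = roots ++ "("^n ++ body with body splitting into bs
theorem parseNode_elim (items roots : List String) (bs : List (List String))
    (h : parseNode items = some (roots, bs)) :
    (∀ t ∈ roots, t ≠ "(" ∧ t ≠ ")") ∧
    ((bs = [] ∧ items = roots ∧ roots ≠ []) ∨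
      (∃ n body, 1 ≤ n ∧ items = roots ++ List.replicate n "(" ++ body ∧
        (∀ y ys, body = y :: ys → y ≠ "(") ∧ splitBranches n body = some bs)) := by
  unfold parseNode at h
  split_ifs at h with h1 h2 h3
  · simp only [Option.some.injEq, Prod.mk.injEq] at h
    obtain ⟨hr, hbs⟩ := h
    subst hr; subst hbs
    have hroots : ∀ t ∈ items.takeWhile (fun t => t ≠ "("), t ≠ "(" ∧ t ≠ ")" := by
      intro t ht
      refine ⟨by simpa using List.mem_takeWhile_imp ht, ?_⟩
      intro hc; subst hc; exact h1 ht
    refine ⟨hroots, Or.inl ⟨rfl, ?_, ?_⟩⟩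
    · conv_lhs => rw [← List.takeWhile_append_dropWhile (p := fun t => t ≠ "(") (l := items)]
      have : items.dropWhile (fun t => t ≠ "(") = [] := by
        simpa [List.isEmpty_iff] using h2
      rw [this, List.append_nil]
    · intro hc
      have : items = [] := by
        have := List.takeWhile_append_dropWhile (p := fun t => t ≠ "(") (l := items)
        have h4 : items.dropWhile (fun t => t ≠ "(") = [] := by
          simpa [List.isEmpty_iff] using h2
        rw [hc, h4] at this
        simpa using this.symm
      rw [this] at h3; simp at h3
  · rcases Option.map_eq_some_iff.mp h with ⟨bs', hsb, he⟩
    simp only [Prod.mk.injEq] at he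
    obtain ⟨hr, hbs⟩ := he
    subst hr; subst hbs
    have hroots : ∀ t ∈ items.takeWhile (fun t => t ≠ "("), t ≠ "(" ∧ t ≠ ")" := by
      intro t ht
      refine ⟨by simpa using List.mem_takeWhile_imp ht, ?_⟩
      intro hc; subst hc; exact h1 ht
    refine ⟨hroots, Or.inr ?_⟩
    refine ⟨(((items.dropWhile (fun t => t ≠ "(")).takeWhile (fun t => t = "(")).length), 
      ((items.dropWhile (fun t => t ≠ "(")).dropWhile (fun t => t = "(")), ?_, ?_, ?_, hsb⟩
    · rcases hx : items.dropWhile (fun t => t ≠ "(") with _ | ⟨y, ys⟩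
      · rw [hx] at h2; simp at h2
      · have hy : y = "(" := dropWhile_ne_paren_head items y ys hx
        subst hy
        simp
    · have hrep : (items.dropWhile (fun t => t ≠ "(")).takeWhile (fun t => t = "(") =
          List.replicate ((items.dropWhile (fun t => t ≠ "(")).takeWhile (fun t => t = "(")).length "(" := by
        apply List.eq_replicate_of_mem
        intro t ht
        simpa using List.mem_takeWhile_imp ht
      conv_lhs => rw [← List.takeWhile_append_dropWhile (p := fun t => t ≠ "(") (l := items)]
      rw [List.append_assoc, ← hrep]
      congr 1
      rw [List.takeWhile_append_dropWhile]
    · intro y ys hb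
      exact dropWhile_paren_head_ne _ y ys hb

-- ---- the A side: the three loops on a parsed node ----

theorem aLoop1_names : ∀ (ns : List String), ns ≠ [] → (∀ t ∈ ns, t ≠ "(") →
    aLoop1 ns = (ns, ns.length - 1) := by
  intro ns
  induction ns with
  | nil => intro h; exact absurd rfl h
  | cons x xs ih =>
    intro _ hall
    have hx : x ≠ "(" := hall x (by simp)
    cases xs with
    | nil => simp [aLoop1, hx]
    | cons y ys =>
      have := ih (by simp) (fun t ht => hall t (by simp [ht]))
      simp only [aLoop1, if_neg hx, this]
      simp

theorem aLoop1_split : ∀ (roots tail : List String), (∀ t ∈ roots, t ≠ "(") →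
    aLoop1 (roots ++ "(" :: tail) = (roots, roots.length) := by
  intro roots
  induction roots with
  | nil =>
    intro tail _
    cases tail <;> simp [aLoop1]
  | cons r rs ih =>
    intro tail hall
    have hr : r ≠ "(" := hall r (by simp)
    have hrec := ih tail (fun t ht => hall t (by simp [ht]))
    rcases h : rs ++ "(" :: tail with _ | ⟨y, ys⟩
    · exact absurd h (by simp)
    · simp only [List.cons_append, h, aLoop1, if_neg hr]
      rw [← h, hrec]
      simp

theorem aLoop2_run : ∀ (n : Nat) (body : List String), 1 ≤ n → body ≠ [] →
    (∀ y ys, body = y :: ys → y ≠ "(") →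
    aLoop2 (List.replicate n "(" ++ body) = (n, n) := by
  intro n
  induction n with
  | zero => intro _ h; omega
  | succ n ih =>
    intro body _ hne hhd
    rcases hb : body with _ | ⟨y, ys⟩
    · exact absurd hb hne
    · have hy : y ≠ "(" := hhd y ys hb
      rcases Nat.eq_zero_or_pos n with hn | hn
      · subst hn
        have h0 : aLoop2 (y :: ys) = (0, 0) := by
          cases ys <;> simp [aLoop2, hy]
        simp [aLoop2, h0]
      · subst hb
        have hrec := ih (y :: ys) hn (by simp) hhd
        rcases hrep : List.replicate n "(" ++ y :: ys with _ | ⟨z, zs⟩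
        · simp at hrep
        · rw [List.replicate_succ, List.cons_append, hrep]
          simp only [aLoop2]
          rw [← hrep, hrec]
          simp

theorem aLoop3_skip : ∀ (B : List String) (d : Int) (rest : List String) (bc : Int)
    (acc : List String), (∀ p x, (p ++ [x]) <+: B → x = ")" → 0 < d + depth p) →
    aLoop3 (B ++ rest) bc (bc + d) acc = aLoop3 rest bc (bc + d + depth B) (B.reverse ++ acc) := by
  intro B
  induction B with
  | nil => intro d rest bc acc _; simp [depth_nil]
  | cons x B' ih =>
    intro d rest bc acc hsafe
    by_cases hx : x = ")"
    · subst hx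
      have hd : 0 < d := by
        have := hsafe [] ")" (by simp) rfl
        simpa [depth_nil] using this
      have hneq : ¬ (bc + d = bc) := by omega
      have hsafe' : ∀ p y, (p ++ [y]) <+: B' → y = ")" → 0 < (d - 1) + depth p := by
        intro p y hp hy
        have := hsafe (")" :: p) y (by rw [List.cons_append]; exact List.cons_prefix_cons.mpr ⟨rfl, hp⟩) hy
        rw [depth_cons, depthTok_close] at this
        omega
      have hstep : aLoop3 ((")" :: B') ++ rest) bc (bc + d) acc
          = aLoop3 (B' ++ rest) bc (bc + (d - 1)) (")" :: acc) := by
        simp [aLoop3, hneq]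
        try (congr 1; ring)
      rw [hstep, ih (d - 1) rest bc (")" :: acc) hsafe', depth_cons, depthTok_close]
      congr 1
      · ring
      · simp
    · by_cases hx2 : x = "("
      · subst hx2
        have hsafe' : ∀ p y, (p ++ [y]) <+: B' → y = ")" → 0 < (d + 1) + depth p := by
          intro p y hp hy
          have := hsafe ("(" :: p) y (by rw [List.cons_append]; exact List.cons_prefix_cons.mpr ⟨rfl, hp⟩) hy
          rw [depth_cons, depthTok_open] at this
          omega
        have hstep : aLoop3 (("(" :: B') ++ rest) bc (bc + d) acc
            = aLoop3 (B' ++ rest) bc (bc + (d + 1)) ("(" :: acc) := by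
          simp [aLoop3]
          try (congr 1; ring)
        rw [hstep, ih (d + 1) rest bc ("(" :: acc) hsafe', depth_cons, depthTok_open]
        congr 1
        · ring
        · simp
      · have hsafe' : ∀ p y, (p ++ [y]) <+: B' → y = ")" → 0 < d + depth p := by
          intro p y hp hy
          have := hsafe (x :: p) y (by rw [List.cons_append]; exact List.cons_prefix_cons.mpr ⟨rfl, hp⟩) hy
          rw [depth_cons, depthTok_other x hx2 hx] at this
          omega
        have hstep : aLoop3 ((x :: B') ++ rest) bc (bc + d) acc
            = aLoop3 (B' ++ rest) bc (bc + d) (x :: acc) := by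
          simp [aLoop3, hx, hx2]
        rw [hstep, ih d rest bc (x :: acc) hsafe', depth_cons, depthTok_other x hx2 hx]
        congr 1
        · ring
        · simp

theorem aLoop3_branches : ∀ (n : Nat) (body : List String) (bs : List (List String)), 1 ≤ n →
    splitBranches n body = some bs → aLoop3 body (n : Int) (n : Int) [] = bs := by
  intro n
  induction n with
  | zero => intro _ _ h; omega
  | succ m ih =>
    intro body bs _ hsb
    simp only [splitBranches] at hsb
    rcases Option.bind_eq_some_iff.mp hsb with ⟨⟨b, r⟩, hsp, hmap⟩
    rcases Option.map_eq_some_iff.mp hmap with ⟨bs', hsb', hbs⟩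
    subst hbs
    have hshape := wfSplit_shape 0 body b r hsp
    obtain ⟨hsafe, hbal⟩ := wfSplit_safe 0 body b r hsp
    subst hshape
    have hbal' : depth b = 0 := by simpa using hbal
    have hskip : aLoop3 (b ++ ")" :: r) ((m + 1 : Nat) : Int) ((m + 1 : Nat) : Int) []
        = aLoop3 (")" :: r) ((m + 1 : Nat) : Int) ((m + 1 : Nat) : Int) b.reverse := by
      have := aLoop3_skip b 0 (")" :: r) ((m + 1 : Nat) : Int) []
        (by intro p x hp hx; simpa using hsafe p x hp hx)
      simpa [hbal'] using this
    rw [hskip]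
    rcases Nat.eq_zero_or_pos m with hm | hm
    · subst hm
      simp only [splitBranches, Option.some.injEq] at hsb'
      subst hsb'
      have hstep0 : aLoop3 (")" :: r) (1 : Int) (1 : Int) b.reverse = [b.reverse.reverse, r] := by
        simp [aLoop3]
      have : aLoop3 (")" :: r) ((0 + 1 : Nat) : Int) ((0 + 1 : Nat) : Int) b.reverse
          = [b.reverse.reverse, r] := hstep0
      rw [this]
      simp
    · have hne : ¬ (((m + 1 : Nat) : Int) - 1 = 0) := by push_cast; omega
      have hstepc : aLoop3 (")" :: r) ((m + 1 : Nat) : Int) ((m + 1 : Nat) : Int) b.reverse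
          = b.reverse.reverse :: aLoop3 r (((m + 1 : Nat) : Int) - 1) (((m + 1 : Nat) : Int) - 1) [] := by
        simp [aLoop3]
        intro h0
        exact absurd h0 (by omega)
      rw [hstepc]
      have hc : ((m + 1 : Nat) : Int) - 1 = ((m : Nat) : Int) := by push_cast; ring
      rw [hc, ih r bs' hm hsb']
      simp

theorem gwb_eq (items : List String) : gwb_items_to_canon_py items =
    if items.isEmpty then "" else
      ("(" ++ PySem.Str.join "(" (aLoop1 items).1) ++
        PySem.Str.join ""
          (PySem.List.sorted2
            ((aLoop3 (items.drop ((aLoop1 items).2 + (aLoop2 (items.drop (aLoop1 items).2)).2))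
                (((aLoop2 (items.drop (aLoop1 items).2)).1 : Nat) : Int)
                (((aLoop2 (items.drop (aLoop1 items).2)).1 : Nat) : Int) []).map
              gwb_items_to_canon_py)
            PySem.Str.len (fun x => x)) ++
        pyRParens (aLoop1 items).1.length := by
  rw [gwb_items_to_canon_py]
  split_ifs with h
  · rfl
  · simp

theorem gwbA_eq_mkCanon (items roots : List String) (bs : List (List String))
    (h : parseNode items = some (roots, bs)) :
    gwb_items_to_canon_py items = mkCanonStr roots (bs.map gwb_items_to_canon_py) := by
  obtain ⟨hroots, hcase⟩ := parseNode_elim items roots bs h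
  rcases hcase with ⟨hbs, hitems, hne⟩ | ⟨n, body, hn, hitems, hbody, hsb⟩
  · subst hbs; subst hitems
    obtain ⟨ys, y, hconcat⟩ : ∃ ys y, items = ys ++ [y] := by
      rcases List.eq_nil_or_concat items with h' | ⟨ys, y, h'⟩
      · exact absurd h' hne
      · exact ⟨ys, y, by simpa [List.concat_eq_append] using h'⟩
    have hy := hroots y (by rw [hconcat]; simp)
    have h1 := aLoop1_names items hne (fun t ht => (hroots t ht).1)
    have h2 : items.drop (items.length - 1) = [y] := by
      rw [hconcat]
      have hl : (ys ++ [y]).length - 1 = ys.length := by simp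
      rw [hl]
      simp
    have h3 : aLoop2 [y] = (0, 0) := by simp [aLoop2, hy.1]
    have h4 : aLoop3 [y] (0 : Int) (0 : Int) [] = [] := by
      simp [aLoop3, hy.1, hy.2]
    rw [gwb_eq]
    rw [if_neg (by simpa [List.isEmpty_iff] using hne)]
    simp [h1, h2, h3, h4, mkCanonStr]
  · subst hitems
    have hne : roots ++ List.replicate n "(" ++ body ≠ [] := by
      rcases n with _ | n
      · omega
      · simp [List.replicate_succ]
    have hbne : body ≠ [] := by
      intro hc
      subst hc
      rcases n with _ | n
      · omega
      · simp [splitBranches, wfSplit] at hsb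
    have h1 : aLoop1 (roots ++ List.replicate n "(" ++ body) = (roots, roots.length) := by
      rcases n with _ | n
      · omega
      · rw [List.append_assoc, List.replicate_succ, List.cons_append]
        exact aLoop1_split roots _ (fun t ht => (hroots t ht).1)
    have h2 : (roots ++ List.replicate n "(" ++ body).drop roots.length
        = List.replicate n "(" ++ body := by
      rw [List.append_assoc]
      simp
    have h3 : aLoop2 (List.replicate n "(" ++ body) = (n, n) :=
      aLoop2_run n body hn hbne hbody
    have h4 : (roots ++ List.replicate n "(" ++ body).drop (roots.length + n) = body := by
      have he : roots ++ List.replicate n "(" ++ body = (roots ++ List.replicate n "(") ++ body := by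
        simp
      have hl : roots.length + n = (roots ++ List.replicate n "(").length := by simp
      rw [he, hl]
      simp
    have h5 : aLoop3 body ((n : Nat) : Int) ((n : Nat) : Int) [] = bs :=
      aLoop3_branches n body bs hn hsb
    rw [gwb_eq]
    rw [if_neg (by simpa [List.isEmpty_iff] using hne)]
    simp only [h1, h2, h3, h4, h5]
    rfl
-- ---- the B side: the stack machine on a parsed node ----

def bFinishAll : List BFrame → String
  | [] => ""
  | f :: rest => bFinish rest (bFinalize f)

theorem alt_eq (s : List String) :
    gwb_items_to_canon_py_alt s = bFinishAll (s.foldl bStep [bFresh]) := by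
  unfold gwb_items_to_canon_py_alt bFinishAll
  cases s.foldl bStep [bFresh] <;> rfl

theorem bRun_names : ∀ (ns : List String) (rs : List String) (k : Nat) (cs : List String)
    (st : List BFrame), (∀ t ∈ ns, t ≠ "(" ∧ t ≠ ")") →
    ns.foldl bStep (⟨rs, k, cs, false⟩ :: st) = ⟨rs ++ ns, k, cs, false⟩ :: st := by
  intro ns
  induction ns with
  | nil => intro rs k cs st _; simp
  | cons t ts ih =>
    intro rs k cs st hall
    have ht := hall t (by simp)
    have hstep : bStep (⟨rs, k, cs, false⟩ :: st) t = ⟨rs ++ [t], k, cs, false⟩ :: st := by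
      simp [bStep, bFeed, ht.1, ht.2]
    simp only [List.foldl_cons, hstep, ih (rs ++ [t]) k cs st (fun u hu => hall u (by simp [hu]))]
    simp

theorem bRun_opens : ∀ (n : Nat) (rs : List String) (k : Nat) (cs : List String) (b : Bool)
    (st : List BFrame), 1 ≤ n →
    (List.replicate n "(").foldl bStep (⟨rs, k, cs, b⟩ :: st) = ⟨rs, k + n, cs, true⟩ :: st := by
  intro n
  induction n with
  | zero => intro _ _ _ _ _ h; omega
  | succ n ih =>
    intro rs k cs b st _
    have hstep : bStep (⟨rs, k, cs, b⟩ :: st) "(" = ⟨rs, k + 1, cs, true⟩ :: st := by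
      simp [bStep]
    rcases Nat.eq_zero_or_pos n with hn | hn
    · subst hn; simp [List.replicate, hstep]
    · simp only [List.replicate, List.foldl_cons, hstep, ih rs (k + 1) cs true st hn]
      congr 2
      omega

theorem bRun_child_start (t : String) (ts : List String) (rs : List String) (k : Nat)
    (cs : List String) (st : List BFrame) (ht : t ≠ "(") :
    (t :: ts).foldl bStep (⟨rs, k, cs, true⟩ :: st) =
      (t :: ts).foldl bStep (bFresh :: ⟨rs, k, cs, false⟩ :: st) := by
  simp only [List.foldl_cons]
  congr 1
  simp [bStep, ht, bFresh]

theorem bFinalize_mk (r : List String) (k : Nat) (cs : List String) (b : Bool) :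
    bFinalize ⟨r, k, cs, b⟩ = mkCanonStr r cs := rfl

theorem bClose_zero (code : String) (r : List String) (cs : List String) (b : Bool)
    (st : List BFrame) :
    bClose code (⟨r, 0, cs, b⟩ :: st) = bClose (mkCanonStr r (cs ++ [code])) st := by
  simp [bClose, bFinalize_mk]

theorem bClose_pos (code : String) (r : List String) (k : Nat) (cs : List String) (b : Bool)
    (st : List BFrame) (hk : k ≠ 0) :
    bClose code (⟨r, k, cs, b⟩ :: st) = bFresh :: ⟨r, k - 1, cs ++ [code], b⟩ :: st := by
  simp [bClose, hk]

theorem bStep_close (r : List String) (k : Nat) (cs : List String) (st : List BFrame) :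
    bStep (⟨r, k, cs, false⟩ :: st) ")" = bClose (mkCanonStr r cs) st := by
  simp [bStep, bFeed, bFinalize_mk]

theorem bFinish_cons (r : List String) (k : Nat) (cs : List String) (b : Bool)
    (st : List BFrame) (code : String) :
    bFinish (⟨r, k, cs, b⟩ :: st) code = bFinish st (mkCanonStr r (cs ++ [code])) := rfl

-- the loop over a node's branch regions, given the induction hypothesis for shorter inputs
theorem bInner (N : Nat)
    (IH : ∀ s, s.length < N → wfNode s = true →
      (∀ (st : List BFrame) (more : List String),
          (s ++ ")" :: more).foldl bStep (bFresh :: st) =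
            more.foldl bStep (bClose (gwb_items_to_canon_py_alt s) st)) ∧
      (∀ st : List BFrame,
          bFinishAll (s.foldl bStep (bFresh :: st)) =
            bFinish st (gwb_items_to_canon_py_alt s))) :
    ∀ (k : Nat) (body : List String) (bs : List (List String)) (roots cs : List String)
      (st : List BFrame), splitBranches k body = some bs →
      (∀ b ∈ bs, wfNode b = true) → (∀ b ∈ bs, b.length < N) →
      (∀ more, (body ++ ")" :: more).foldl bStep (bFresh :: ⟨roots, k, cs, false⟩ :: st) =
          more.foldl bStep
            (bClose (mkCanonStr roots (cs ++ bs.map gwb_items_to_canon_py_alt)) st)) ∧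
      (bFinishAll (body.foldl bStep (bFresh :: ⟨roots, k, cs, false⟩ :: st)) =
          bFinish st (mkCanonStr roots (cs ++ bs.map gwb_items_to_canon_py_alt))) := by
  intro k
  induction k with
  | zero =>
    intro body bs roots cs st hsb hwf hlen
    simp only [splitBranches, Option.some.injEq] at hsb
    subst hsb
    have hIH := IH body (hlen body (by simp)) (hwf body (by simp))
    constructor
    · intro more
      rw [hIH.1 (⟨roots, 0, cs, false⟩ :: st) more, bClose_zero]
      simp
    · rw [hIH.2 (⟨roots, 0, cs, false⟩ :: st), bFinish_cons]
      simp
  | succ k ihk =>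
    intro body bs roots cs st hsb hwf hlen
    simp only [splitBranches] at hsb
    rcases Option.bind_eq_some_iff.mp hsb with ⟨⟨b, r⟩, hsp, hmap⟩
    rcases Option.map_eq_some_iff.mp hmap with ⟨bs', hsb', hbs⟩
    subst hbs
    have hshape := wfSplit_shape 0 body b r hsp
    subst hshape
    have hIHb := IH b (hlen b (by simp)) (hwf b (by simp))
    have hrec := ihk r bs' roots (cs ++ [gwb_items_to_canon_py_alt b]) st hsb'
      (fun x hx => hwf x (by simp [hx])) (fun x hx => hlen x (by simp [hx]))
    have hlist : (cs ++ [gwb_items_to_canon_py_alt b]) ++ bs'.map gwb_items_to_canon_py_alt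
        = cs ++ (b :: bs').map gwb_items_to_canon_py_alt := by simp
    constructor
    · intro more
      have e1 : (b ++ ")" :: r) ++ ")" :: more = b ++ ")" :: (r ++ ")" :: more) := by simp
      rw [e1, hIHb.1 (⟨roots, k + 1, cs, false⟩ :: st) (r ++ ")" :: more),
        bClose_pos _ _ _ _ _ _ (by omega)]
      have e2 : k + 1 - 1 = k := by omega
      rw [e2, (hrec).1 more, hlist]
    · rw [hIHb.1 (⟨roots, k + 1, cs, false⟩ :: st) r, bClose_pos _ _ _ _ _ _ (by omega)]
      have e2 : k + 1 - 1 = k := by omega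
      rw [e2, (hrec).2, hlist]

-- the master induction: running a well-formed node from a fresh frame, closed either by an
-- enclosing ")" or by the end of the input, hands the node's code to the frames below
theorem bMaster : ∀ (N : Nat) (s : List String), s.length < N → wfNode s = true →
    (∀ (st : List BFrame) (more : List String),
        (s ++ ")" :: more).foldl bStep (bFresh :: st) =
          more.foldl bStep (bClose (gwb_items_to_canon_py_alt s) st)) ∧
    (∀ st : List BFrame,
        bFinishAll (s.foldl bStep (bFresh :: st)) =
          bFinish st (gwb_items_to_canon_py_alt s)) ∧
    (∀ roots bs, parseNode s = some (roots, bs) →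
        gwb_items_to_canon_py_alt s = mkCanonStr roots (bs.map gwb_items_to_canon_py_alt)) := by
  intro N
  induction N with
  | zero => intro s hs; omega
  | succ N ih =>
    intro s hs hwf
    obtain ⟨roots, bs, hp, hbwf⟩ := (wfNode_iff s).mp hwf
    have hblen : ∀ b ∈ bs, b.length < N := by
      intro b hb
      have := parseNode_branch_length s roots bs b hp hb
      omega
    have IH' : ∀ s', s'.length < N → wfNode s' = true →
        (∀ (st : List BFrame) (more : List String),
            (s' ++ ")" :: more).foldl bStep (bFresh :: st) =
              more.foldl bStep (bClose (gwb_items_to_canon_py_alt s') st)) ∧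
        (∀ st : List BFrame,
            bFinishAll (s'.foldl bStep (bFresh :: st)) =
              bFinish st (gwb_items_to_canon_py_alt s')) :=
      fun s' h w => ⟨(ih s' h w).1, (ih s' h w).2.1⟩
    obtain ⟨hroots, hcase⟩ := parseNode_elim s roots bs hp
    rcases hcase with ⟨hbs, hitems, hne⟩ | ⟨n, body, hn, hitems, hbody, hsb⟩
    · subst hbs; subst hitems
      have hnames : ∀ st : List BFrame, s.foldl bStep (⟨[], 0, [], false⟩ :: st)
          = ⟨s, 0, [], false⟩ :: st := by
        intro st
        have := bRun_names s [] 0 [] st hroots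
        simpa using this
      have halt : gwb_items_to_canon_py_alt s = mkCanonStr s [] := by
        rw [alt_eq]
        show bFinishAll (s.foldl bStep (⟨[], 0, [], false⟩ :: [])) = _
        rw [hnames []]
        rfl
      refine ⟨?_, ?_, ?_⟩
      · intro st more
        rw [List.foldl_append]
        show (")" :: more).foldl bStep (s.foldl bStep (⟨[], 0, [], false⟩ :: st)) = _
        rw [hnames st, List.foldl_cons, bStep_close, halt]
      · intro st
        show bFinishAll (s.foldl bStep (⟨[], 0, [], false⟩ :: st)) = _
        rw [hnames st, halt]
        rfl
      · intro roots' bs' hp'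
        rw [hp] at hp'
        injection hp' with hp''
        injection hp'' with e1 e2
        subst e1; subst e2
        simpa using halt
    · subst hitems
      have hbne : body ≠ [] := by
        intro hc
        subst hc
        rcases n with _ | n
        · omega
        · simp [splitBranches, wfSplit] at hsb
      obtain ⟨y, ys, hyb⟩ : ∃ y ys, body = y :: ys := by
        rcases body with _ | ⟨y, ys⟩
        · exact absurd rfl hbne
        · exact ⟨y, ys, rfl⟩
      have hy : y ≠ "(" := hbody y ys hyb
      have hchain : ∀ (ts : List String) (st : List BFrame),
          ((roots ++ List.replicate n "(" ++ body) ++ ts).foldl bStep (bFresh :: st)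
            = (body ++ ts).foldl bStep (bFresh :: ⟨roots, n, [], false⟩ :: st) := by
        intro ts st
        rw [List.append_assoc, List.append_assoc, List.foldl_append]
        show (List.replicate n "(" ++ (body ++ ts)).foldl bStep
            (roots.foldl bStep (⟨[], 0, [], false⟩ :: st)) = _
        have h1 := bRun_names roots [] 0 [] st hroots
        simp only [List.nil_append] at h1
        rw [h1, List.foldl_append, bRun_opens n roots 0 [] false st hn]
        have e0 : 0 + n = n := by omega
        rw [e0, hyb]
        show (y :: (ys ++ ts)).foldl bStep (⟨roots, n, [], true⟩ :: st) = _
        rw [bRun_child_start y (ys ++ ts) roots n [] st hy]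
        rfl
      have hinner := fun st => bInner N IH' n body bs roots [] st hsb hbwf hblen
      have halt : gwb_items_to_canon_py_alt (roots ++ List.replicate n "(" ++ body)
          = mkCanonStr roots (bs.map gwb_items_to_canon_py_alt) := by
        rw [alt_eq]
        have hc := hchain [] []
        simp only [List.append_nil] at hc
        show bFinishAll ((roots ++ List.replicate n "(" ++ body).foldl bStep
          (bFresh :: [])) = _
        rw [hc, (hinner []).2]
        simp [bFinish]
      refine ⟨?_, ?_, ?_⟩
      · intro st more
        rw [hchain (")" :: more) st, (hinner st).1 more, halt]
        simp
      · intro st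
        have hc := hchain [] st
        simp only [List.append_nil] at hc
        rw [hc, (hinner st).2, halt]
        simp
      · intro roots' bs' hp'
        rw [hp] at hp'
        injection hp' with hp''
        injection hp'' with e1 e2
        subst e1; subst e2
        exact halt

theorem main_aux : ∀ (N : Nat) (items : List String), items.length < N →
    wfNode items = true →
    gwb_items_to_canon_py items = gwb_items_to_canon_py_alt items := by
  intro N
  induction N with
  | zero => intro items h; omega
  | succ N ih =>
    intro items hs hwf
    obtain ⟨roots, bs, hp, hbwf⟩ := (wfNode_iff items).mp hwf
    rw [gwbA_eq_mkCanon items roots bs hp,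
      (bMaster (N + 1) items hs hwf).2.2 roots bs hp]
    have hmap : bs.map gwb_items_to_canon_py = bs.map gwb_items_to_canon_py_alt := by
      apply List.map_congr_left
      intro b hb
      refine ih b ?_ (hbwf b hb)
      have := parseNode_branch_length items roots bs b hp hb
      omega
    rw [hmap]

theorem main_equiv : ∀ (items : List String), Pre_gwb_items_to_canon_py items →
    gwb_items_to_canon_py items = gwb_items_to_canon_py_alt items := by
  intro items hpre
  exact main_aux (items.length + 1) items (by omega) hpre

-- ===== VERDICT (by name: the statement is the Claim_ definition above) =====
theorem gwb_items_to_canon_py_spec : Claim_equal_gwb_items_to_canon_py := by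
  intro items _ hpre
  exact main_equiv items hpre
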